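-- pv_equiv track=rewrite | github.com/ks-is/CTFs | CTF_WriteUp/2017/VolgaCTF 2017 Teaser/lib/algorithm.py | bytes2reg
-- ===== SOURCE A (Python) =====
-- def bytes2reg(m):
-- 	L = 8
-- 	pol = []
-- 	dic = {'1' : 1, '0' : 0}
-- 	for i in m:
-- 		b = bin(ord(i)).split('b')
-- 		b = b[1]
-- 		b = '0'*(L - len(b)) + b
-- 		for c in b:
-- 			pol.append(dic[c])
-- 	return pol
-- ===== SOURCE B (Python) =====
-- def bytes2reg(m):
--     pol = []
--     for i in m:
--         n = ord(i)
--         width = max(8, n.bit_length())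
--         for k in range(width):
--             pol.append((n >> (width - 1 - k)) & 1)
--     return pol
-- ===== Notes on version B (the rewrite author's own statement) =====
-- stated objective: alternative
-- what changed: B extracts each character's bits arithmetically with shifts and masks over range(width) with width = max(8, bit_length), instead of building bin()'s string, splitting off its prefix, zero-padding the string and mapping characters through a dict.
import Mathlib
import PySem

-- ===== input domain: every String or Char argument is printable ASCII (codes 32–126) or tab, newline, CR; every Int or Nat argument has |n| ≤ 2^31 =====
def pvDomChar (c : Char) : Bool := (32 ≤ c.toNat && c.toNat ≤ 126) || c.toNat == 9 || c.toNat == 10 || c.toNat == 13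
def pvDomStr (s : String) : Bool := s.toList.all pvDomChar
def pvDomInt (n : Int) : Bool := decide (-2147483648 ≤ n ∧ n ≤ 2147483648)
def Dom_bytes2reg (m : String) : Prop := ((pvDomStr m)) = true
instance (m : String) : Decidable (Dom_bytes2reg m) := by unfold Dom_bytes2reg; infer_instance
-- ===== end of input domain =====

-- B produces the bits by shifts and masks instead of A's bin()-string slicing/padding/dict lookup; objective: alternative (same cost).

-- ===== PORT A =====
-- hand port of bin(n)[2:] for n ≥ 0: the binary digit characters, "0" for n = 0 (exact)
def pvBinChars (n : Nat) : List Char := Nat.toDigits 2 n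

def pvDic : PySem.Dict Char Int := PySem.Dict.ofList [('1', 1), ('0', 0)]

def bytes2reg (m : String) : List Int :=
  m.toList.foldl (fun pol i =>
    let b := pvBinChars i.toNat
    let b := List.replicate (8 - b.length) '0' ++ b
    -- dic[c]: the key is always present ('0'/'1'), so getD never takes its default
    b.foldl (fun pol c => pol ++ [pvDic.getD c 0]) pol) []

-- ===== PORT B =====
def bytes2reg_alt (m : String) : List Int :=
  m.toList.foldl (fun pol i =>
    let n : Nat := i.toNat
    let width := Nat.max 8 (PySem.Int.bitLength (n : Int))
    (List.range width).foldl (fun pol k =>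
      pol ++ [(((n >>> (width - 1 - k)) &&& 1 : Nat) : Int)]) pol) []

-- ===== PRECONDITION & SPEC =====
def Spec_bytes2reg (m : String) (out : List Int) : Prop := out = bytes2reg_alt m
instance (m : String) (out : List Int) : Decidable (Spec_bytes2reg m out) := by unfold Spec_bytes2reg; infer_instance

-- ===== CLAIM (what is proved, stated in full; the proofs are below) =====
def Claim_equal_bytes2reg : Prop := ∀ (m : String), Dom_bytes2reg m → Spec_bytes2reg m (bytes2reg m)

-- ===== LEMMAS AND PROOFS =====
-- per-character agreement, decided over all Dom characters (codes < 127)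
theorem pv_char_eq : ∀ n : Nat, n < 127 →
    (List.replicate (8 - (pvBinChars n).length) '0' ++ pvBinChars n).map (fun c => pvDic.getD c 0)
      = (List.range (Nat.max 8 (PySem.Int.bitLength (n : Int)))).map
          (fun k => (((n >>> (Nat.max 8 (PySem.Int.bitLength (n : Int)) - 1 - k)) &&& 1 : Nat) : Int)) := by
  decide

theorem pv_step_eq (pol : List Int) (i : Char) (h : i.toNat < 127) :
    (let b := pvBinChars i.toNat
     let b := List.replicate (8 - b.length) '0' ++ b
     b.foldl (fun pol c => pol ++ [pvDic.getD c 0]) pol)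
    = (let n : Nat := i.toNat
       let width := Nat.max 8 (PySem.Int.bitLength (n : Int))
       (List.range width).foldl (fun pol k =>
         pol ++ [(((n >>> (width - 1 - k)) &&& 1 : Nat) : Int)]) pol) := by
  simp only [PySem.List.foldl_append_singleton_eq_map]
  rw [pv_char_eq i.toNat h]

theorem pv_foldl_eq (l : List Char) (hl : ∀ c ∈ l, c.toNat < 127) (pol : List Int) :
    l.foldl (fun pol i =>
      let b := pvBinChars i.toNat
      let b := List.replicate (8 - b.length) '0' ++ b
      b.foldl (fun pol c => pol ++ [pvDic.getD c 0]) pol) pol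
    = l.foldl (fun pol i =>
      let n : Nat := i.toNat
      let width := Nat.max 8 (PySem.Int.bitLength (n : Int))
      (List.range width).foldl (fun pol k =>
        pol ++ [(((n >>> (width - 1 - k)) &&& 1 : Nat) : Int)]) pol) pol := by
  induction l generalizing pol with
  | nil => rfl
  | cons c t ih =>
    simp only [List.foldl_cons]
    rw [pv_step_eq pol c (hl c (List.mem_cons_self))]
    exact ih (fun c hc => hl c (List.mem_cons_of_mem _ hc)) _

-- ===== VERDICT (by name: the statement is the Claim_ definition above) =====
theorem bytes2reg_spec : Claim_equal_bytes2reg := by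
  intro m hdom
  unfold Spec_bytes2reg bytes2reg bytes2reg_alt
  apply pv_foldl_eq
  intro c hc
  have := List.all_eq_true.mp hdom c hc
  simp only [pvDomChar, Bool.or_eq_true, Bool.and_eq_true, decide_eq_true_eq, beq_iff_eq] at this
  omega
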